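-- pv_equiv track=rewrite | github.com/no-zjc/VFCcap | VideoCaption_Hallucination/File_Tools.py | get_count_word_occurrences
-- ===== SOURCE A (Python) =====
-- def get_count_word_occurrences(word_dict):
--     all_word_repeat = []
--     for value in word_dict.values():
--         all_word_repeat = all_word_repeat + [x for x in value if len(x) > 1]
--     word_count = {}
--     for word in all_word_repeat:
--         if word in word_count:
--             word_count[word] += 1
--         else:
--             word_count[word] = 1
--     sorted_word_occurrences = sorted(word_count.items(), key=lambda x: x[1], reverse=True)
--     return sorted_word_occurrences
-- ===== SOURCE B (Python) =====
-- def get_count_word_occurrences(word_dict):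
--     word_count = {}
--     for value in word_dict.values():
--         for x in value:
--             if len(x) > 1:
--                 word_count[x] = word_count.get(x, 0) + 1
--     if not word_count:
--         return []
--     buckets = {}
--     for w, c in word_count.items():
--         buckets[c] = buckets.get(c, []) + [(w, c)]
--     result = []
--     for c in range(max(buckets), 0, -1):
--         result.extend(buckets.get(c, []))
--     return result
-- ===== Notes on version B (the rewrite author's own statement) =====
-- stated objective: faster
-- what changed: A concatenates all words into one repeatedly rebuilt list, counts, then comparison-sorts the items by count; B counts in a single pass over the dict values and emits the result by counting sort (frequency buckets concatenated from the maximum count down to 1), reproducing the stable tie order without any comparison sort.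
import Mathlib
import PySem

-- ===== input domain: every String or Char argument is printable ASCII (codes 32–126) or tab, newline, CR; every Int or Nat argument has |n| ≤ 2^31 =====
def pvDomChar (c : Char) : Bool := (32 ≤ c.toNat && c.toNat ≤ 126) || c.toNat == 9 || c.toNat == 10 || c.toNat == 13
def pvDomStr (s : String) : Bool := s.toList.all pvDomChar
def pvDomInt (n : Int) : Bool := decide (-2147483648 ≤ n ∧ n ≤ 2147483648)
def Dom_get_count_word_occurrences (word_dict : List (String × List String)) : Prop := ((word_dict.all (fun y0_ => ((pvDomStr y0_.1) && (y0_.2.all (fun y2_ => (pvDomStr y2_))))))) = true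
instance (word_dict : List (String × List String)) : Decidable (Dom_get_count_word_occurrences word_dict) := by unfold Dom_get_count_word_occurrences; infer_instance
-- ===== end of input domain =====

-- B replaces A's quadratically rebuilt word list + comparison sort by one counting pass and
-- a counting sort over frequency buckets, same stable order (objective: faster).

-- ===== PORT A =====
def get_count_word_occurrences (word_dict : List (String × List String)) : List (String × Int) :=
  let all_word_repeat : List String :=
    word_dict.foldl (fun acc v => acc ++ (v.2.filter (fun x => decide (1 < PySem.Str.len x)))) []
  let word_count : PySem.Dict String Int :=
    all_word_repeat.foldl (fun d word =>
      if d.contains word then d.modify word 0 (· + 1) else d.insert word 1) PySem.Dict.empty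
  PySem.List.sorted word_count.items (fun x => x.2) true

-- ===== PORT B =====
def get_count_word_occurrences_alt (word_dict : List (String × List String)) : List (String × Int) :=
  let word_count : PySem.Dict String Int :=
    word_dict.foldl (fun d v =>
      v.2.foldl (fun d x =>
        if 1 < PySem.Str.len x then d.insert x (d.getD x 0 + 1) else d) d) PySem.Dict.empty
  if word_count.items = [] then []
  else
    let buckets : PySem.Dict Int (List (String × Int)) :=
      word_count.items.foldl (fun b p => b.insert p.2 (b.getD p.2 [] ++ [p])) PySem.Dict.empty
    match PySem.List.max? buckets.keys (fun c => c) with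
    | none => []   -- unreachable: word_count (hence buckets) is nonempty here
    | some maxc =>
      (PySem.List.pyRange maxc 0 (-1)).foldl (fun res c => res ++ buckets.getD c []) []

-- ===== PRECONDITION & SPEC =====
def Spec_get_count_word_occurrences (word_dict : List (String × List String)) (out : List (String × Int)) : Prop := out = get_count_word_occurrences_alt word_dict
instance (word_dict : List (String × List String)) (out : List (String × Int)) : Decidable (Spec_get_count_word_occurrences word_dict out) := by unfold Spec_get_count_word_occurrences; infer_instance

-- ===== CLAIM (what is proved, stated in full; the proofs are below) =====
def Claim_equal_get_count_word_occurrences : Prop := ∀ (word_dict : List (String × List String)), Dom_get_count_word_occurrences word_dict → Spec_get_count_word_occurrences word_dict (get_count_word_occurrences word_dict)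

-- ===== LEMMAS AND PROOFS =====

-- insertBy passes over a block it does not go before
theorem insertBy_pass {α : Type} (before : α → α → Bool) (x : α) (ys zs : List α)
    (h : ∀ y ∈ ys, before x y = false) :
    PySem.List.insertBy before x (ys ++ zs) = ys ++ PySem.List.insertBy before x zs := by
  induction ys with
  | nil => simp
  | cons y t ih =>
    simp only [List.cons_append, PySem.List.insertBy, h y (by simp)]
    simp [ih (fun y hy => h y (by simp [hy]))]

-- insertBy goes in front of a block it goes before everywhere
theorem insertBy_front {α : Type} (before : α → α → Bool) (x : α) (ys : List α)
    (h : ∀ y ∈ ys, before x y = true) :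
    PySem.List.insertBy before x ys = x :: ys := by
  cases ys with
  | nil => simp [PySem.List.insertBy]
  | cons y t => simp [PySem.List.insertBy, h y (by simp)]

-- inserting x into a bucket concatenation appends it to the end of its own bucket
theorem insertBy_flatMap (cs : List Int) (F : Int → List (String × Int)) (x : String × Int)
    (hcs : cs.Pairwise (· > ·)) (hx : x.2 ∈ cs)
    (hF : ∀ c ∈ cs, ∀ p ∈ F c, p.2 = c) :
    PySem.List.insertBy (fun a b => decide (b.2 < a.2)) x (cs.flatMap F) =
      cs.flatMap (fun c => F c ++ if x.2 == c then [x] else []) := by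
  induction cs with
  | nil => simp at hx
  | cons c cs' ih =>
    rw [List.pairwise_cons] at hcs
    rcases hcs with ⟨hc, hcs'⟩
    simp only [List.flatMap_cons]
    by_cases hxc : x.2 = c
    · have hpass : ∀ y ∈ F c, (fun a b => decide (b.2 < a.2)) x y = false := by
        intro y hy
        have := hF c (by simp) y hy
        simp [this, hxc]
      have hfront : ∀ y ∈ cs'.flatMap F, (fun a b => decide (b.2 < a.2)) x y = true := by
        intro y hy
        rcases List.mem_flatMap.1 hy with ⟨c', hc', hyc'⟩
        have h1 := hF c' (by simp [hc']) y hyc'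
        have h2 := hc c' hc'
        simp [h1, hxc]; omega
      have hrest : cs'.flatMap (fun c' => F c' ++ if x.2 == c' then [x] else []) = cs'.flatMap F := by
        apply List.flatMap_congr
        intro c' hc'
        have h2 := hc c' hc'
        have hne : ¬ (x.2 == c') = true := by simp [hxc]; omega
        simp [hne]
      rw [insertBy_pass _ _ _ _ hpass, insertBy_front _ _ _ hfront, hrest]
      have heq : (x.2 == c) = true := by simp [hxc]
      simp [heq]
    · have hx' : x.2 ∈ cs' := by
        rcases List.mem_cons.1 hx with h | h
        · exact absurd h hxc
        · exact h
      have hpass : ∀ y ∈ F c, (fun a b => decide (b.2 < a.2)) x y = false := by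
        intro y hy
        have h1 := hF c (by simp) y hy
        have h2 := hc _ hx'
        simp [h1]; omega
      rw [insertBy_pass _ _ _ _ hpass,
        ih hcs' hx' (fun c' hc' p hp => hF c' (by simp [hc']) p hp)]
      have : ¬ (x.2 == c) = true := by simp [hxc]
      simp [this]

-- a stable reverse sort by an Int key whose values all lie in a strictly decreasing list cs
-- is the concatenation, along cs, of the key-c sublists in original order
theorem sorted_rev_eq_flatMap (cs : List Int) (l : List (String × Int))
    (hcs : cs.Pairwise (· > ·)) (hl : ∀ p ∈ l, p.2 ∈ cs) :
    PySem.List.sorted l (fun x => x.2) true =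
      cs.flatMap (fun c => l.filter (fun p => p.2 == c)) := by
  rw [PySem.List.sorted_rev_eq_foldl_insertBy]
  induction l using List.reverseRecOn with
  | nil => simp
  | append_singleton l' x ih =>
    rw [List.foldl_append, List.foldl_cons, List.foldl_nil,
      ih (fun p hp => hl p (by simp [hp])),
      insertBy_flatMap cs _ x hcs (hl x (by simp))
        (fun c _ p hp => by simpa using (List.mem_filter.1 hp).2)]
    apply List.flatMap_congr
    intro c _
    by_cases h : x.2 = c <;> simp [List.filter_append, h]

-- A's counting loop is the standard counter fold
theorem a_count_fun_eq :
    (fun (d : PySem.Dict String Int) word =>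
        if d.contains word then d.modify word 0 (· + 1) else d.insert word 1) =
    (fun (d : PySem.Dict String Int) word => d.insert word (d.getD word 0 + 1)) := by
  funext d w
  by_cases h : d.contains w
  · simp [h, PySem.Dict.modify]
  · simp only [h, Bool.false_eq_true, if_false]
    rw [PySem.Dict.getD_of_not_contains d 0 (by simpa using h)]
    norm_num

-- pyRange(n, 0, -1) is n, n-1, …, 1
theorem pyRange_down (n : Int) :
    PySem.List.pyRange n 0 (-1) = (List.range n.toNat).map (fun k : Nat => n + -1 * (k : Int)) := by
  simp only [PySem.List.pyRange]
  norm_num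
  by_cases h : 0 < n
  · rw [if_pos h]
  · rw [if_neg h]
    have h0 : n.toNat = 0 := by omega
    simp [h0]

theorem mem_pyRange_down (n c : Int) : c ∈ PySem.List.pyRange n 0 (-1) ↔ 1 ≤ c ∧ c ≤ n := by
  rw [pyRange_down]
  simp only [List.mem_map, List.mem_range]
  constructor
  · rintro ⟨k, hk, rfl⟩
    omega
  · rintro ⟨h1, h2⟩
    exact ⟨(n - c).toNat, by omega, by omega⟩

theorem pyRange_down_pairwise (n : Int) : (PySem.List.pyRange n 0 (-1)).Pairwise (· > ·) := by
  rw [pyRange_down]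
  exact List.Pairwise.map _ (fun a b h => by simp only [gt_iff_lt]; omega) List.pairwise_lt_range

theorem get_count_word_occurrences_spec' (word_dict : List (String × List String)) :
    get_count_word_occurrences word_dict = get_count_word_occurrences_alt word_dict := by
  unfold get_count_word_occurrences get_count_word_occurrences_alt
  simp only []
  -- the flattened filtered word list
  set p : String → Bool := fun x => decide (1 < PySem.Str.len x) with hp
  set ws : List String := word_dict.flatMap (fun v => v.2.filter p) with hws
  -- A's word list
  have hA_list : word_dict.foldl (fun acc v => acc ++ (v.2.filter p)) [] = ws := by
    rw [PySem.List.foldl_append_eq_flatMap, List.nil_append]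
  -- both counting loops build counter ws
  have hA_count :
      ws.foldl (fun d word =>
        if d.contains word then d.modify word 0 (· + 1) else d.insert word 1)
        PySem.Dict.empty = PySem.Dict.counter ws := by
    rw [a_count_fun_eq]
    exact PySem.Dict.foldl_insert_getD_add_one_eq_counter ws
  have hB_count :
      word_dict.foldl (fun d v =>
        v.2.foldl (fun d x =>
          if 1 < PySem.Str.len x then d.insert x (d.getD x 0 + 1) else d) d)
        PySem.Dict.empty = PySem.Dict.counter ws := by
    rw [← PySem.Dict.foldl_insert_getD_add_one_eq_counter, hws, ← List.filter_flatMap,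
      List.foldl_filter, ← List.foldl_flatMap]
    congr 1
    funext d x
    simp [hp]
  rw [hA_list, hA_count, hB_count]
  -- items of the counter
  set items : List (String × Int) := (PySem.Dict.counter ws).items with hitems
  by_cases hnil : items = []
  · simp [hnil, PySem.List.sorted]
  · simp only [if_neg hnil]
    -- bucket contents and keys
    set buckets : PySem.Dict Int (List (String × Int)) :=
      items.foldl (fun b q => b.insert q.2 (b.getD q.2 [] ++ [q])) PySem.Dict.empty with hbk
    have hbuckets_fold : buckets =
        (items.map (fun q => (q.2, q))).foldl
          (fun b r => b.modify r.1 [] (fun l => l ++ [r.2])) PySem.Dict.empty := by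
      rw [List.foldl_map]; rfl
    have hgetD : ∀ c : Int, buckets.getD c [] = items.filter (fun q => q.2 == c) := by
      intro c
      rw [hbuckets_fold, PySem.Dict.getD_foldl_modify_append]
      rw [List.filter_map]
      simp [List.map_map, Function.comp_def]
    have hkeys : buckets.keys = PySem.Set.ofList (items.map (fun q => q.2)) := by
      rw [hbuckets_fold]
      have := PySem.Dict.keys_foldl_modify_key (items.map (fun q => (q.2, q)))
        (fun r => r.1) [] (fun b r l => l ++ [r.2]) PySem.Dict.empty
      simp only [PySem.Dict.modify] at this ⊢
      rw [this, PySem.Dict.keys_empty]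
      simp [PySem.Set.update, PySem.Set.ofList, PySem.Set.empty, List.map_map,
        Function.comp_def]
    -- counts are at least 1
    have hpos : ∀ q ∈ items, 1 ≤ q.2 := by
      intro q hq
      rw [hitems, PySem.Dict.items_counter] at hq
      rcases List.mem_map.1 hq with ⟨k, hk, rfl⟩
      have : k ∈ ws := (PySem.Set.mem_ofList ws k).1 hk
      have := List.count_pos_iff.2 this
      simp; omega
    -- buckets nonempty, so max? returns its maximum
    have hkeys_ne : buckets.keys ≠ [] := by
      rw [hkeys]
      intro h
      rcases List.exists_mem_of_ne_nil items hnil with ⟨q, hq⟩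
      have : q.2 ∈ PySem.Set.ofList (items.map (fun q => q.2)) :=
        (PySem.Set.mem_ofList _ _).2 (List.mem_map_of_mem hq)
      simp [h] at this
    rcases hmax : PySem.List.max? buckets.keys (fun c => c) with _ | maxc
    · exact absurd ((PySem.List.max?_eq_none_iff _ _).1 hmax) hkeys_ne
    · simp only []
      have hle : ∀ q ∈ items, q.2 ≤ maxc := by
        intro q hq
        exact PySem.List.max?_isMax hmax q.2
          (by rw [hkeys]; exact (PySem.Set.mem_ofList _ _).2 (List.mem_map_of_mem hq))
      rw [PySem.List.foldl_append_eq_flatMap]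
      have hmem : ∀ q ∈ items, q.2 ∈ PySem.List.pyRange maxc 0 (-1) := by
        intro q hq
        rw [mem_pyRange_down]
        exact ⟨hpos q hq, hle q hq⟩
      rw [sorted_rev_eq_flatMap _ _ (pyRange_down_pairwise maxc) hmem]
      simp only [List.nil_append]
      apply List.flatMap_congr
      intro c _
      rw [hgetD]

-- ===== VERDICT (by name: the statement is the Claim_ definition above) =====
theorem get_count_word_occurrences_spec : Claim_equal_get_count_word_occurrences := by
  intro word_dict _
  unfold Spec_get_count_word_occurrences
  exact get_count_word_occurrences_spec' word_dict
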